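-- pv_equiv track=rewrite | github.com/lkhedlund/python-practice | misc/findABC.py | findABC
-- ===== SOURCE A (Python) =====
-- def findABC(input_string):
-- 	ABC_true = ""
-- 	if len(input_string) < 2:
-- 		return False
-- 	else:
-- 		for i in range(len(input_string)):
-- 			if input_string[i] == "A":
-- 				if input_string[i+1] == 'B':
-- 					if input_string[i+2] == 'C':
-- 						return True
-- 					else:
-- 						pass
-- 				else:
-- 					pass
-- 			else:
-- 				return False
-- ===== SOURCE B (Python) =====
-- def findABC(input_string):
--     if len(input_string) < 2:
--         return False
--     stripped = input_string.lstrip('A')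
--     r = len(input_string) - len(stripped)
--     return r > 0 and input_string[r:r+2] == 'BC'
-- ===== Notes on version B (the rewrite author's own statement) =====
-- stated objective: simpler
-- what changed: A's single loop with nested three-level indexing and early returns becomes: strip the leading run of letter A, derive its length r, and compare the safe two-character slice starting at r against the pattern letters B,C; the safe slice also makes B total.
import Mathlib
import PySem

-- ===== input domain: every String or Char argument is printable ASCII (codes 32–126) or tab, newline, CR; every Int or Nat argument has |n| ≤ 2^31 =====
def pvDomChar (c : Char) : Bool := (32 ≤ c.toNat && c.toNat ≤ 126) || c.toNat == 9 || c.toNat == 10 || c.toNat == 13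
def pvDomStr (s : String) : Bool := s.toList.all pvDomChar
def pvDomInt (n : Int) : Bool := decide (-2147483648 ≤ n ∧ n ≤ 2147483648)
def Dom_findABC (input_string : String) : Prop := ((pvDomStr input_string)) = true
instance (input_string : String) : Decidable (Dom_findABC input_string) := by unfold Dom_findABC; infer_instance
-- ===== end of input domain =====

-- B replaces A's single loop with nested three-deep indexing by stripping the leading
-- run of letter A and comparing one safe two-character slice against the pattern
-- (simpler); on the inputs excluded by Pre_findABC (where A raises) B returns False.

-- ===== PORT A =====
-- A's `for i in range(len(input_string))`: recursion over the list of indices;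
-- s[i+1] / s[i+2] may be out of range in Python (IndexError, the `none` branches,
-- excluded by Pre_findABC); s[i] itself is always in range.
def findABCLoopA (l : List Char) : List Nat → Bool
  | [] => false                 -- loop completes without returning (Python: None; unreachable for len ≥ 2)
  | i :: rest =>
    match l[i]? with
    | some c =>
      if c = 'A' then
        match l[i + 1]? with
        | some c1 =>
          if c1 = 'B' then
            match l[i + 2]? with
            | some c2 => if c2 = 'C' then true else findABCLoopA l rest
            | none => false     -- IndexError in Python; outside Pre_findABC
          else findABCLoopA l rest
        | none => false         -- IndexError in Python; outside Pre_findABC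
      else false
    | none => false             -- unreachable: range indices are in range

def findABC (input_string : String) : Bool :=
  if input_string.toList.length < 2 then false
  else findABCLoopA input_string.toList (List.range input_string.toList.length)

-- ===== PORT B =====
def findABC_alt (input_string : String) : Bool :=
  let l := input_string.toList
  if l.length < 2 then false
  else
    let stripped := l.dropWhile (· = 'A')   -- input_string.lstrip of letter A: drop the leading run (exact)
    let r := l.length - stripped.length
    decide (0 < r) && (PySem.List.slice l (some (r : Int)) (some ((r : Int) + 2)) == ['B', 'C'])

-- ===== PRECONDITION & SPEC =====
-- Pre_ excludes exactly the inputs on which A raises IndexError: length ≥ 2 and the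
-- string is entirely letter A, or a leading run of letter A followed by one final letter B.
def Pre_findABC (input_string : String) : Prop :=
  input_string.toList.length < 2 ∨ input_string.toList.head? ≠ some 'A' ∨
    (input_string.toList.dropWhile (· = 'A') ≠ [] ∧
     input_string.toList.dropWhile (· = 'A') ≠ ['B'])
instance (input_string : String) : Decidable (Pre_findABC input_string) := by
  unfold Pre_findABC; infer_instance
def pvWitness_findABC : String := "AABC"

def Spec_findABC (input_string : String) (out : Bool) : Prop := out = findABC_alt input_string
instance (input_string : String) (out : Bool) : Decidable (Spec_findABC input_string out) := by unfold Spec_findABC; infer_instance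

-- ===== CLAIM (what is proved, stated in full; the proofs are below) =====
def Claim_equal_findABC : Prop := ∀ (input_string : String), Dom_findABC input_string → Pre_findABC input_string → Spec_findABC input_string (findABC input_string)

-- ===== LEMMAS AND PROOFS =====

-- structural reformulation of A's loop, for the induction
def findABCLoopB : List Char → Bool
  | [] => false
  | c :: rest =>
    if c = 'A' then
      match rest with
      | c1 :: rest2 =>
        if c1 = 'B' then
          match rest2 with
          | c2 :: _ => if c2 = 'C' then true else findABCLoopB rest
          | [] => false
        else findABCLoopB rest
      | [] => false
    else false

theorem findABCLoopA_eq_loopB (l : List Char) (k : Nat) :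
    ∀ i, i + k = l.length →
      findABCLoopA l (List.range' i k) = findABCLoopB (l.drop i) := by
  induction k with
  | zero =>
    intro i h
    have hd : l.drop i = [] := List.drop_eq_nil_iff.mpr (by omega)
    simp [List.range', findABCLoopA, hd, findABCLoopB]
  | succ k ih =>
    intro i h
    have hi : i < l.length := by omega
    obtain ⟨c, t, hct⟩ : ∃ c t, l.drop i = c :: t := by
      cases hd : l.drop i with
      | nil => exact absurd (List.drop_eq_nil_iff.mp hd) (by omega)
      | cons c t => exact ⟨c, t, rfl⟩
    have hc : l[i]? = some c := by
      have h0 : (l.drop i)[0]? = l[i + 0]? := List.getElem?_drop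
      rw [hct] at h0; simpa using h0.symm
    have ht : l.drop (i + 1) = t := by
      have : (l.drop i).drop 1 = l.drop (i + 1) := by rw [List.drop_drop]
      simpa [hct] using this.symm
    have h1 : l[i + 1]? = t[0]? := by rw [← ht, List.getElem?_drop]
    have h2 : l[i + 2]? = t[1]? := by
      rw [show i + 2 = (i + 1) + 1 from rfl, ← ht, List.getElem?_drop]
    have hrec := ih (i + 1) (by omega)
    rw [ht] at hrec
    rw [List.range'_succ]
    simp only [findABCLoopA, hc, h1, h2, hct]
    by_cases hcA : c = 'A'
    · subst hcA
      cases t with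
      | nil => simp [findABCLoopB]
      | cons c1 rest2 =>
        by_cases hc1 : c1 = 'B'
        · subst hc1
          cases rest2 with
          | nil => simp [findABCLoopB]
          | cons c2 r3 =>
            by_cases hc2 : c2 = 'C'
            · subst hc2; simp [findABCLoopB]
            · simp [findABCLoopB, hc2, hrec]
        · simp [findABCLoopB, hc1, hrec]
    · simp [findABCLoopB, hcA]

-- B's target value, phrased structurally
def findABCTgt (l : List Char) : Bool :=
  if l.head? = some 'A' then
    match l.dropWhile (· = 'A') with
    | 'B' :: 'C' :: _ => true
    | _ => false
  else false

theorem loopB_eq_tgt (l : List Char)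
    (hpre : l.head? ≠ some 'A' ∨
      (l.dropWhile (· = 'A') ≠ [] ∧ l.dropWhile (· = 'A') ≠ ['B'])) :
    findABCLoopB l = findABCTgt l := by
  induction l with
  | nil => simp [findABCLoopB, findABCTgt]
  | cons c rest ih =>
    by_cases hcA : c = 'A'
    · subst hcA
      have hdrop : ('A' :: rest).dropWhile (· = 'A') = rest.dropWhile (· = 'A') := by
        simp [List.dropWhile]
      have hpre' : rest.dropWhile (· = 'A') ≠ [] ∧ rest.dropWhile (· = 'A') ≠ ['B'] := by
        rcases hpre with h | h
        · simp at h
        · rw [hdrop] at h; exact h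
      cases rest with
      | nil => simp at hpre'
      | cons c1 rest2 =>
        by_cases hc1A : c1 = 'A'
        · subst hc1A
          have hrec := ih (Or.inr (by simpa [List.dropWhile] using hpre'))
          simp only [findABCLoopB] at hrec ⊢
          simp only [findABCTgt, List.head?_cons, hdrop] at hrec ⊢
          simpa using hrec
        · have hd1 : (c1 :: rest2).dropWhile (· = 'A') = c1 :: rest2 := by
            simp [List.dropWhile, hc1A]
          rw [hd1] at hpre'
          by_cases hc1 : c1 = 'B'
          · subst hc1
            cases rest2 with
            | nil => exact absurd rfl hpre'.2
            | cons c2 rest3 =>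
              by_cases hc2 : c2 = 'C'
              · subst hc2; simp [findABCLoopB, findABCTgt, hdrop, hd1]
              · have : findABCTgt ('A' :: 'B' :: c2 :: rest3) = false := by
                  simp only [findABCTgt, List.head?_cons, hdrop, hd1]
                  simp [hc2]
                rw [this]
                simp [findABCLoopB, hc2]
          · have : findABCTgt ('A' :: c1 :: rest2) = false := by
              simp only [findABCTgt, List.head?_cons, hdrop, hd1]
              cases rest2 <;> simp [hc1]
            rw [this]
            simp [findABCLoopB, hc1, hc1A]
    · simp [findABCLoopB, findABCTgt, hcA]

theorem drop_takeWhile_length {l : List Char} :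
    l.drop (l.takeWhile (· = 'A')).length = l.dropWhile (· = 'A') := by
  induction l with
  | nil => simp
  | cons c t ih =>
    by_cases hc : c = 'A' <;> simp [List.takeWhile, List.dropWhile, hc, ih]

theorem slice_take_two (l : List Char) (r : Nat) :
    PySem.List.slice l (some (r : Int)) (some ((r : Int) + 2)) = (l.drop r).take 2 := by
  rw [show ((r : Int) + 2) = (((r + 2 : Nat)) : Int) by push_cast; ring,
    PySem.List.slice_natCast]
  congr 1
  omega

theorem alt_eq_tgt (l : List Char) :
    (decide (0 < l.length - (l.dropWhile (· = 'A')).length) &&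
      (PySem.List.slice l (some ((l.length - (l.dropWhile (· = 'A')).length : Nat) : Int))
        (some (((l.length - (l.dropWhile (· = 'A')).length : Nat) : Int) + 2)) == ['B', 'C']))
      = findABCTgt l := by
  have hlen : l.length = (l.takeWhile (· = 'A')).length + (l.dropWhile (· = 'A')).length := by
    have h0 := congrArg List.length
      (List.takeWhile_append_dropWhile (p := fun x => decide (x = 'A')) (l := l))
    rw [List.length_append] at h0
    omega
  have hr : l.length - (l.dropWhile (· = 'A')).length = (l.takeWhile (· = 'A')).length := by
    omega
  rw [hr, slice_take_two, drop_takeWhile_length]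
  have hhead : (0 < (l.takeWhile (· = 'A')).length) ↔ l.head? = some 'A' := by
    cases l with
    | nil => simp
    | cons c t => by_cases hc : c = 'A' <;> simp [List.takeWhile, hc]
  unfold findABCTgt
  by_cases hh : l.head? = some 'A'
  · rw [if_pos hh]
    have h1 : decide (0 < (l.takeWhile (· = 'A')).length) = true := by simp [hhead, hh]
    rw [h1, Bool.true_and]
    cases hd : l.dropWhile (· = 'A') with
    | nil => simp
    | cons c1 t1 =>
      cases t1 with
      | nil => simp
      | cons c2 t2 =>
        by_cases hc1 : c1 = 'B' <;> by_cases hc2 : c2 = 'C' <;> subst_vars <;> simp_all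
  · rw [if_neg hh]
    have h0 : decide (0 < (l.takeWhile (· = 'A')).length) = false := by
      simp only [decide_eq_false_iff_not]; rw [hhead]; exact hh
    simp [h0]

-- ===== VERDICT (by name: the statement is the Claim_ definition above) =====
theorem findABC_spec : Claim_equal_findABC := by
  intro s _ hpre
  unfold Spec_findABC findABC findABC_alt
  by_cases hlen : s.toList.length < 2
  · simp only [if_pos hlen]
  · simp only [if_neg hlen]
    rw [List.range_eq_range',
      findABCLoopA_eq_loopB s.toList s.toList.length 0 (by omega), List.drop_zero]
    rw [loopB_eq_tgt s.toList (by
      unfold Pre_findABC at hpre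
      rcases hpre with h | h | h
      · omega
      · exact Or.inl h
      · exact Or.inr h)]
    exact (alt_eq_tgt s.toList).symm
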